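-- pv_equiv track=rewrite | github.com/yoonjiseok/Algorithm | 프로그래머스/2/389479. 서버 증설 횟수/서버 증설 횟수.py | solution
-- ===== SOURCE A (Python) =====
-- def solution(players, m, k):
--     server = {}
--     id = 0
--     n = 0
--     curr_time = 0
--     for i in range(len(players)):
--
--         for x in list(server.keys()):
--             if server[x]['time'] <= curr_time:
--                 del server[x]
--
--         while (players[i] // m) > len(server):
--             server[id] = {'time' : curr_time + k}
--             id += 1
--
--         curr_time += 1
--
--
--     return id
-- ===== SOURCE B (Python) =====
-- def solution(players, m, k):
--     # A server added at hour t blocks additions through hour t .. t+max(k,1)-1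
--     # (A removes servers whose time <= current hour only at the start of the
--     # NEXT hour, so even k <= 0 gives one hour of service).
--     life = k if k > 1 else 1
--     expire = {}          # hour -> number of servers that stop counting then
--     active = 0
--     total = 0
--     for t, p in enumerate(players):
--         active -= expire.get(t, 0)
--         need = p // m
--         if need > active:
--             expire[t + life] = need - active
--             total += need - active
--             active = need
--     return total
-- ===== Notes on version B (the rewrite author's own statement) =====
-- stated objective: faster
-- what changed: B replaces A's per-hour rescan of the whole server dict (delete expired keys one by one, then grow the dict one server at a time in a while loop) by a running active-server counter plus a per-hour expiry table: each hour does one dict lookup to retire expired servers and one arithmetic batch addition, so no per-server work remains.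
import Mathlib
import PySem

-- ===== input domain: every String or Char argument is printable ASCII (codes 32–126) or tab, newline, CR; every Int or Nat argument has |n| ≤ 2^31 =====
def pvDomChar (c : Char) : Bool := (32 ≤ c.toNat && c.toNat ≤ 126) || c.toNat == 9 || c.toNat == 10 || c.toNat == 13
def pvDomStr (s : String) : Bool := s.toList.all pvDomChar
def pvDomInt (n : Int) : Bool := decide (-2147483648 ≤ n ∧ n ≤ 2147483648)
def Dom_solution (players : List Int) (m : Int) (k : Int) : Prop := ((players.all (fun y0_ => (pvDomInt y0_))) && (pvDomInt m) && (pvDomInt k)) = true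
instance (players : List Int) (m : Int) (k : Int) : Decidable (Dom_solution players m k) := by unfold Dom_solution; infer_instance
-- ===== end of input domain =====

-- B replaces A's per-hour rescan and per-server deletion over the whole server
-- dict by a running active-server counter plus a per-hour expiry table
-- (one dict lookup per hour); same return value, different bookkeeping.

-- ===== PORT A =====
-- Python-dict replica for A's server dict with O(1) operations: lookups and
-- len via a hash table, iteration order via the list of keys in (reverse)
-- insertion order; an erased key is left in the order list as a tombstone and
-- skipped when the keys are listed.  Exact for this program: keys (server ids)
-- come from a strictly increasing counter and are never re-inserted after an
-- erase, and values of live keys are exactly those in the hash table.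
structure PyServ where
  rorder : List Int
  tbl : Std.HashMap Int (PySem.Dict String Int)

def PyServ.empty : PyServ := ⟨[], ∅⟩

def PyServ.keys (s : PyServ) : List Int := s.rorder.reverse.filter (fun x => s.tbl.contains x)

def PyServ.get? (s : PyServ) (x : Int) : Option (PySem.Dict String Int) := s.tbl[x]?

def PyServ.erase (s : PyServ) (x : Int) : PyServ := ⟨s.rorder, s.tbl.erase x⟩

def PyServ.insert (s : PyServ) (x : Int) (v : PySem.Dict String Int) : PyServ :=
  if s.tbl.contains x then ⟨s.rorder, s.tbl.insert x v⟩ else ⟨x :: s.rorder, s.tbl.insert x v⟩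

def PyServ.len (s : PyServ) : Int := (s.tbl.size : Int)

-- the value dict {'time': tm}
def pvTimeDict (tm : Int) : PySem.Dict String Int := PySem.Dict.empty.insert "time" tm

-- one iteration of "for x in list(server.keys()): if server[x]['time'] <= curr_time: del server[x]"
def pvDelStep (curr : Int) (sv : PyServ) (x : Int) : PyServ :=
  match sv.get? x with
  | some d =>
    match d.get? "time" with
    | some tm => if tm ≤ curr then sv.erase x else sv
    | none => sv
  | none => sv

-- the while loop; the fuel (need - len(server)).toNat is exactly the number of
-- iterations Python performs (each insert uses a fresh key); it only makes the
-- same computation total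
def pvAddLoop (p m k curr : Int) : Nat → PyServ → Int → PyServ × Int
  | 0, sv, id => (sv, id)
  | Nat.succ fuel, sv, id =>
    if PySem.Int.floordiv p m > sv.len then
      pvAddLoop p m k curr fuel (sv.insert id (pvTimeDict (curr + k))) (id + 1)
    else (sv, id)

-- one iteration of the outer for-loop; state = (server, id, curr_time)
def pvStepA (m k : Int) (st : PyServ × Int × Int) (p : Int) : PyServ × Int × Int :=
  let sv := st.1.keys.foldl (pvDelStep st.2.2) st.1
  let r := pvAddLoop p m k st.2.2 ((PySem.Int.floordiv p m - sv.len).toNat) sv st.2.1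
  (r.1, r.2, st.2.2 + 1)

def solution (players : List Int) (m : Int) (k : Int) : Int :=
  (players.foldl (pvStepA m k) (PyServ.empty, 0, 0)).2.1

-- ===== PORT B =====
-- one iteration of B's loop; state = (expire, active, total), input (t, p)
def pvStepB (m lf : Int) (st : PySem.Dict Int Int × Int × Int) (tp : Int × Int) :
    PySem.Dict Int Int × Int × Int :=
  let active := st.2.1 - st.1.getD tp.1 0
  let need := PySem.Int.floordiv tp.2 m
  if need > active then
    (st.1.insert (tp.1 + lf) (need - active), need, st.2.2 + (need - active))
  else (st.1, active, st.2.2)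

-- new A-side: PyServ replica

def solution_alt (players : List Int) (m : Int) (k : Int) : Int :=
  let lf := if k > 1 then k else 1
  ((PySem.List.enumerate players 0).foldl (pvStepB m lf) (PySem.Dict.empty, 0, 0)).2.2

-- ===== PRECONDITION & SPEC =====
-- Pre_ excludes exactly the inputs where A raises: m = 0 with a nonempty
-- players list makes "players[i] // m" raise ZeroDivisionError.
def Pre_solution (players : List Int) (m : Int) (k : Int) : Prop := m ≠ 0 ∨ players = []
instance (players : List Int) (m : Int) (k : Int) : Decidable (Pre_solution players m k) := by
  unfold Pre_solution; infer_instance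

def pvWitness_solution : List Int × Int × Int := ([2, 5, 1], 1, 2)

def Spec_solution (players : List Int) (m : Int) (k : Int) (out : Int) : Prop := out = solution_alt players m k
instance (players : List Int) (m : Int) (k : Int) (out : Int) : Decidable (Spec_solution players m k out) := by unfold Spec_solution; infer_instance

-- ===== CLAIM (what is proved, stated in full; the proofs are below) =====
def Claim_equal_solution : Prop := ∀ (players : List Int) (m : Int) (k : Int), Dom_solution players m k → Pre_solution players m k → Spec_solution players m k (solution players m k)

-- ===== LEMMAS AND PROOFS =====
def pvEntries (tm b : Int) (c : Nat) : List (Int × PySem.Dict String Int) :=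
  (PySem.List.pyRange b (b + c) 1).map (fun x => (x, pvTimeDict tm))

lemma pvEntries_succ (tm b : Int) (c : Nat) :
    pvEntries tm b (c+1) = (b, pvTimeDict tm) :: pvEntries tm (b+1) c := by
  unfold pvEntries
  rw [show b + ((c:Nat)+1 : Nat) = (b+1) + (c:Int) by omega]
  rw [PySem.List.pyRange_one_cons (by omega)]
  simp

lemma pvEntries_len (tm b : Int) (c : Nat) : (pvEntries tm b c).length = c := by
  simp [pvEntries, PySem.List.length_pyRange_one]

lemma pvEntries_keys (tm b : Int) (c : Nat) :
    (pvEntries tm b c).map Prod.fst = PySem.List.pyRange b (b + c) 1 := by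
  simp only [pvEntries, List.map_map]
  exact List.map_id _

lemma pvSumSplit {α : Type} (p : α → Bool) (f : α → Int) :
    ∀ (L : List α), ((L.filter p).map f).sum + ((L.filter (fun x => !p x)).map f).sum = (L.map f).sum := by
  intro L
  induction L with
  | nil => simp
  | cons a L ih => by_cases h : p a <;> simp [h] <;> omega

def pvDead (t : Int) (d : PySem.Dict String Int) : Bool :=
  match d.get? "time" with
  | some tm => decide (tm ≤ t)
  | none => false

lemma pvDead_timeDict (t tm : Int) : pvDead t (pvTimeDict tm) = decide (tm ≤ t) := by
  simp [pvDead, pvTimeDict, PySem.Dict.get?_insert_self]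

def pvFlat (k : Int) (L : List (Int × Int × Nat)) : List (Int × PySem.Dict String Int) :=
  (L.map (fun b => pvEntries (b.1 + k) b.2.1 b.2.2)).flatten

lemma pvFlat_nil (k : Int) : pvFlat k [] = [] := rfl

lemma pvFlat_cons (k : Int) (b : Int × Int × Nat) (L : List (Int × Int × Nat)) :
    pvFlat k (b :: L) = pvEntries (b.1 + k) b.2.1 b.2.2 ++ pvFlat k L := by
  simp [pvFlat]

lemma pvFlat_append (k : Int) (L M : List (Int × Int × Nat)) :
    pvFlat k (L ++ M) = pvFlat k L ++ pvFlat k M := by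
  simp [pvFlat]

lemma pvFlat_length (k : Int) (L : List (Int × Int × Nat)) :
    (pvFlat k L).length = (L.map (fun b => b.2.2)).sum := by
  induction L with
  | nil => simp [pvFlat]
  | cons b L ih => simp [pvFlat_cons, pvEntries_len, ih]

lemma pvFlat_mem_key (k : Int) (L : List (Int × Int × Nat)) (pr : Int × PySem.Dict String Int)
    (h : pr ∈ pvFlat k L) : ∃ b ∈ L, b.2.1 ≤ pr.1 ∧ pr.1 < b.2.1 + (b.2.2 : Int) ∧ pr.2 = pvTimeDict (b.1 + k) := by
  induction L with
  | nil => simp [pvFlat] at h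
  | cons b L ih =>
    rw [pvFlat_cons, List.mem_append] at h
    rcases h with h | h
    · refine ⟨b, List.mem_cons_self, ?_⟩
      simp only [pvEntries, List.mem_map] at h
      obtain ⟨x, hx, hpr⟩ := h
      rw [PySem.List.mem_pyRange_one] at hx
      rw [← hpr]
      exact ⟨hx.1, hx.2, rfl⟩
    · obtain ⟨y, hy, hrest⟩ := ih h
      exact ⟨y, List.mem_cons_of_mem _ hy, hrest⟩

lemma pvFlat_keys_nodup (k : Int) (L : List (Int × Int × Nat))
    (hp : L.Pairwise (fun x y => x.2.1 + (x.2.2 : Int) ≤ y.2.1)) :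
    ((pvFlat k L).map Prod.fst).Nodup := by
  induction L with
  | nil => simp [pvFlat]
  | cons b L ih =>
    rw [pvFlat_cons, List.map_append]
    rw [List.pairwise_cons] at hp
    apply List.Nodup.append
    · rw [pvEntries_keys]; exact PySem.List.nodup_pyRange_one _ _
    · exact ih hp.2
    · intro a ha hb
      rw [pvEntries_keys, PySem.List.mem_pyRange_one] at ha
      rw [List.mem_map] at hb
      obtain ⟨pr, hpr, hfst⟩ := hb
      obtain ⟨y, hy, h1, _, _⟩ := pvFlat_mem_key k L pr hpr
      have := hp.1 y hy
      omega

lemma pvFlat_filter (k lf t : Int) (hlf : lf = if k > 1 then k else 1) :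
    ∀ L : List (Int × Int × Nat), (∀ b ∈ L, b.1 < t) →
    (pvFlat k L).filter (fun pr => !pvDead t pr.2) =
      pvFlat k (L.filter (fun b => decide (t + 1 ≤ b.1 + lf))) := by
  intro L
  induction L with
  | nil => intro _; simp [pvFlat]
  | cons b L ih =>
    intro hb
    rw [pvFlat_cons, List.filter_append, List.filter_cons,
        ih (fun y hy => hb y (List.mem_cons_of_mem _ hy))]
    have hbt : b.1 < t := hb b List.mem_cons_self
    by_cases hkeep : t + 1 ≤ b.1 + lf
    · have hnd : ¬ (b.1 + k ≤ t) := by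
        by_cases hk1 : k > 1 <;> simp [hk1] at hlf <;> omega
      rw [if_pos (by simpa using hkeep), pvFlat_cons]
      congr 1
      apply List.filter_eq_self.mpr
      intro pr hpr
      simp only [pvEntries, List.mem_map] at hpr
      obtain ⟨x, _, hpr⟩ := hpr
      rw [← hpr]
      simp [pvDead_timeDict, hnd]
    · have hdd : b.1 + k ≤ t := by
        by_cases hk1 : k > 1 <;> simp [hk1] at hlf <;> omega
      rw [if_neg (by simpa using hkeep)]
      have : (pvEntries (b.1 + k) b.2.1 b.2.2).filter (fun pr => !pvDead t pr.2) = [] := by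
        apply List.filter_eq_nil_iff.mpr
        intro pr hpr
        simp only [pvEntries, List.mem_map] at hpr
        obtain ⟨x, _, hpr⟩ := hpr
        rw [← hpr]
        simp [pvDead_timeDict, hdd]
      rw [this, List.nil_append]

lemma pvSumCast (L : List (Int × Int × Nat)) :
    (((L.map (fun b => b.2.2)).sum : Nat) : Int) = (L.map (fun b => ((b.2.2 : Nat) : Int))).sum := by
  induction L with
  | nil => simp
  | cons b L ih => simp [ih]

lemma pvFilterU (lf t u : Int) (hu : t + 1 ≤ u) :
    ∀ L : List (Int × Int × Nat), (∀ b ∈ L, t ≤ b.1 + lf) →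
    (L.filter (fun b => decide (t + 1 ≤ b.1 + lf))).filter (fun b => b.1 + lf == u) =
      L.filter (fun b => b.1 + lf == u) := by
  intro L hL
  rw [List.filter_filter]
  apply List.filter_congr
  intro b hb
  by_cases he : b.1 + lf = u
  · simp [he]; omega
  · simp [he]

def pvDeadO (t : Int) (o : Option (PySem.Dict String Int)) : Bool :=
  match o with
  | some d => pvDead t d
  | none => false

lemma pvDelStep_eq (t : Int) (sv : PyServ) (x : Int) :
    pvDelStep t sv x = if pvDeadO t (sv.get? x) then sv.erase x else sv := by
  unfold pvDelStep pvDeadO pvDead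
  cases h : sv.get? x with
  | none => simp
  | some d =>
    cases hd : d.get? "time" with
    | none => simp [hd]
    | some tm => by_cases htm : tm ≤ t <;> simp [hd, htm]

lemma pvGetMkAppend (l₁ l₂ : List (Int × PySem.Dict String Int)) (x : Int) :
    (PySem.Dict.mk (l₁ ++ l₂)).get? x
      = ((PySem.Dict.mk l₁).get? x).or ((PySem.Dict.mk l₂).get? x) := by
  simp only [PySem.Dict.get?, List.find?_append]
  cases l₁.find? (fun p => p.1 == x) <;> simp

lemma pvGetMkEntries (tm b : Int) (c : Nat) (x : Int) :
    (PySem.Dict.mk (pvEntries tm b c)).get? x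
      = if b ≤ x ∧ x < b + (c : Int) then some (pvTimeDict tm) else none := by
  induction c generalizing b with
  | zero =>
    have h0 : pvEntries tm b 0 = [] := by simp [pvEntries, PySem.List.pyRange_one_eq_nil]
    rw [h0, if_neg (by push_cast; omega)]
    simp [PySem.Dict.get?]
  | succ c ih =>
    rw [pvEntries_succ, PySem.Dict.get?_mk_cons]
    by_cases hx : b = x
    · subst hx
      rw [if_pos (show (b == b) = true by simp), if_pos (by push_cast; omega)]
    · rw [if_neg (by simpa using hx), ih (b + 1)]
      by_cases h1 : b + 1 ≤ x ∧ x < b + 1 + (c : Int)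
      · rw [if_pos h1, if_pos (by push_cast; omega)]
      · rw [if_neg h1, if_neg (by push_cast; omega)]

lemma pvGetMkFilter (t : Int) :
    ∀ (items : List (Int × PySem.Dict String Int)), (items.map Prod.fst).Nodup → ∀ x : Int,
    (PySem.Dict.mk (items.filter (fun pr => !pvDead t pr.2))).get? x
      = match (PySem.Dict.mk items).get? x with
        | some v => if pvDead t v then none else some v
        | none => none := by
  intro items
  induction items with
  | nil => intro _ x; simp [PySem.Dict.get?]
  | cons pr items ih =>
    obtain ⟨k₀, v₀⟩ := pr
    intro hnd x
    simp only [List.map_cons, List.nodup_cons] at hnd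
    rw [List.filter_cons, PySem.Dict.get?_mk_cons]
    by_cases hx : (k₀ == x) = true
    · simp only [hx, if_true]
      have hx' : k₀ = x := by simpa using hx
      by_cases hd : pvDead t v₀
      · simp only [hd, Bool.not_true, Bool.false_eq_true, if_false, if_true]
        rw [ih hnd.2 x]
        have hnone : (PySem.Dict.mk items).get? x = none := by
          rw [PySem.Dict.get?_eq_none_iff_not_mem_keys]
          simpa [PySem.Dict.keys, hx'] using hnd.1
        rw [hnone]
      · simp only [hd, Bool.not_false, if_true, Bool.false_eq_true, if_false]
        rw [PySem.Dict.get?_mk_cons]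
        simp [hx]
    · by_cases hd : pvDead t v₀
      · simp only [hd, Bool.not_true, Bool.false_eq_true, if_false, hx]
        exact ih hnd.2 x
      · simp only [hd, Bool.not_false, if_true]
        rw [PySem.Dict.get?_mk_cons]
        simp only [hx, Bool.false_eq_true, if_false]
        exact ih hnd.2 x

lemma pvCountDead (t : Int) :
    ∀ (items : List (Int × PySem.Dict String Int)), (items.map Prod.fst).Nodup →
    ((items.map Prod.fst).filter (fun x => pvDeadO t ((PySem.Dict.mk items).get? x))).length
      = (items.filter (fun pr => pvDead t pr.2)).length := by
  intro items
  induction items with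
  | nil => intro _; simp
  | cons pr items ih =>
    obtain ⟨k₀, v₀⟩ := pr
    intro hnd
    simp only [List.map_cons, List.nodup_cons] at hnd
    simp only [List.map_cons, List.filter_cons]
    have hself : (PySem.Dict.mk ((k₀, v₀) :: items)).get? k₀ = some v₀ := by
      rw [PySem.Dict.get?_mk_cons]; simp
    have hcongr : (items.map Prod.fst).filter
        (fun x => pvDeadO t ((PySem.Dict.mk ((k₀, v₀) :: items)).get? x))
        = (items.map Prod.fst).filter (fun x => pvDeadO t ((PySem.Dict.mk items).get? x)) := by
      apply List.filter_congr
      intro x hx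
      have hne : ¬ (k₀ == x) = true := by
        simp only [beq_iff_eq]
        intro he; exact hnd.1 (he ▸ hx)
      rw [PySem.Dict.get?_mk_cons, if_neg hne]
    rw [hself, hcongr]
    by_cases hd : pvDead t v₀
    · rw [if_pos (by simp [pvDeadO, hd]), if_pos (by simp [hd])]
      simp only [List.length_cons]
      rw [ih hnd.2]
    · rw [if_neg (by simp [pvDeadO, hd]), if_neg (by simp [hd])]
      exact ih hnd.2

lemma pvFlat_keys_sorted (k : Int) (L : List (Int × Int × Nat))
    (hp : L.Pairwise (fun x y => x.2.1 + (x.2.2 : Int) ≤ y.2.1)) :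
    ((pvFlat k L).map Prod.fst).Pairwise (· < ·) := by
  induction L with
  | nil => simp [pvFlat]
  | cons b L ih =>
    rw [pvFlat_cons, List.map_append]
    rw [List.pairwise_cons] at hp
    apply List.pairwise_append.mpr
    refine ⟨?_, ih hp.2, ?_⟩
    · rw [pvEntries_keys]; exact PySem.List.pairwise_lt_pyRange_one _ _
    · intro a ha y hy
      rw [pvEntries_keys, PySem.List.mem_pyRange_one] at ha
      rw [List.mem_map] at hy
      obtain ⟨pr, hpr, hfst⟩ := hy
      obtain ⟨z, hz, h1, _, _⟩ := pvFlat_mem_key k L pr hpr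
      have := hp.1 z hz
      omega

lemma pvFilterRangeMem :
    ∀ (l : List Int) (a b : Int), l.Pairwise (· < ·) → (∀ x ∈ l, a ≤ x ∧ x < b) →
    (PySem.List.pyRange a b 1).filter (fun x => decide (x ∈ l)) = l := by
  intro l
  induction l with
  | nil =>
    intro a b _ _
    apply List.filter_eq_nil_iff.mpr
    intro x _
    simp
  | cons c l ih =>
    intro a b hpw hbd
    rw [List.pairwise_cons] at hpw
    have hc := hbd c List.mem_cons_self
    rw [PySem.List.pyRange_one_append a c b (by omega) (by omega), List.filter_append]
    have h1 : (PySem.List.pyRange a c 1).filter (fun x => decide (x ∈ c :: l)) = [] := by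
      apply List.filter_eq_nil_iff.mpr
      intro x hx
      rw [PySem.List.mem_pyRange_one] at hx
      simp only [decide_eq_true_eq, List.mem_cons]
      rintro (rfl | hxl)
      · omega
      · have := hpw.1 x hxl; omega
    rw [h1, List.nil_append, PySem.List.pyRange_one_cons (by omega), List.filter_cons]
    rw [if_pos (by simp)]
    congr 1
    have h2 : (PySem.List.pyRange (c + 1) b 1).filter (fun x => decide (x ∈ c :: l))
        = (PySem.List.pyRange (c + 1) b 1).filter (fun x => decide (x ∈ l)) := by
      apply List.filter_congr
      intro x hx
      rw [PySem.List.mem_pyRange_one] at hx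
      simp only [List.mem_cons]
      have : ¬ x = c := by omega
      simp [this]
    rw [h2]
    exact ih (c + 1) b hpw.2 (fun x hx => ⟨by have := hpw.1 x hx; omega, (hbd x (List.mem_cons_of_mem _ hx)).2⟩)

lemma pvSizePos (m : Std.HashMap Int (PySem.Dict String Int)) (x : Int) (h : x ∈ m) :
    0 < m.size := by
  have h1 := Std.HashMap.isEmpty_eq_false_iff_exists_mem.mpr ⟨x, h⟩
  rw [Std.HashMap.isEmpty_eq_size_eq_zero] at h1
  simp at h1
  omega

lemma pvDelFold (t : Int) : ∀ (ks : List Int) (sv : PyServ), ks.Nodup →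
    (ks.foldl (pvDelStep t) sv).rorder = sv.rorder
    ∧ (∀ x : Int, (ks.foldl (pvDelStep t) sv).tbl[x]?
        = if x ∈ ks ∧ pvDeadO t sv.tbl[x]? = true then none else sv.tbl[x]?)
    ∧ (ks.foldl (pvDelStep t) sv).tbl.size
        + (ks.filter (fun x => pvDeadO t sv.tbl[x]?)).length = sv.tbl.size := by
  intro ks
  induction ks with
  | nil =>
    intro sv _
    refine ⟨rfl, fun x => by simp, by simp⟩
  | cons x ks ih =>
    intro sv hnd
    rw [List.nodup_cons] at hnd
    rw [List.foldl_cons, pvDelStep_eq]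
    by_cases hdead : pvDeadO t (sv.get? x) = true
    · rw [if_pos hdead]
      obtain ⟨ho, hg, hs⟩ := ih (sv.erase x) hnd.2
      have hget : ∀ y : Int, (PyServ.erase sv x).tbl[y]? = if x = y then none else sv.tbl[y]? := by
        intro y
        simp [PyServ.erase, Std.HashMap.getElem?_erase]
      have hmem : x ∈ sv.tbl := by
        have : sv.tbl[x]?.isSome := by
          unfold pvDeadO at hdead
          unfold PyServ.get? at hdead
          cases hx : sv.tbl[x]? with
          | none => rw [hx] at hdead; simp at hdead
          | some d => simp
        rwa [← Std.HashMap.contains_eq_isSome_getElem?, ← Std.HashMap.mem_iff_contains] at this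
      refine ⟨ho, ?_, ?_⟩
      · intro y
        rw [hg y, hget y]
        by_cases hxy : x = y
        · subst hxy
          rw [if_pos rfl]
          have : ¬ (x ∈ ks ∧ pvDeadO t (none : Option (PySem.Dict String Int)) = true) := by
            intro hc
            simp [pvDeadO] at hc
          rw [if_neg this, if_pos ⟨List.mem_cons_self, hdead⟩]
        · rw [if_neg hxy]
          by_cases hin : y ∈ ks ∧ pvDeadO t sv.tbl[y]? = true
          · rw [if_pos hin, if_pos ⟨List.mem_cons_of_mem _ hin.1, hin.2⟩]
          · rw [if_neg hin, if_neg (by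
              intro hc
              rcases hc with ⟨hm, hdd⟩
              rcases List.mem_cons.mp hm with rfl | hm'
              · exact hxy rfl
              · exact hin ⟨hm', hdd⟩)]
      · have hsz : (PyServ.erase sv x).tbl.size = sv.tbl.size - 1 := by
          simp [PyServ.erase, Std.HashMap.size_erase, hmem]
        have hpos : 0 < sv.tbl.size := pvSizePos sv.tbl x hmem
        have hflt : ks.filter (fun y => pvDeadO t (PyServ.erase sv x).tbl[y]?)
            = ks.filter (fun y => pvDeadO t sv.tbl[y]?) := by
          apply List.filter_congr
          intro y hy
          have hxy : ¬ x = y := fun he => hnd.1 (he ▸ hy)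
          rw [hget y, if_neg hxy]
        rw [hflt] at hs
        rw [List.filter_cons, if_pos (by exact hdead)]
        simp only [List.length_cons]
        omega
    · rw [if_neg hdead]
      obtain ⟨ho, hg, hs⟩ := ih sv hnd.2
      refine ⟨ho, ?_, ?_⟩
      · intro y
        rw [hg y]
        by_cases hxy : x = y
        · subst hxy
          have hc : ¬ (x ∈ ks ∧ pvDeadO t sv.tbl[x]? = true) := by
            intro hc; exact hdead hc.2
          rw [if_neg hc, if_neg (by intro hc2; exact hdead hc2.2)]
        · by_cases hin : y ∈ ks ∧ pvDeadO t sv.tbl[y]? = true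
          · rw [if_pos hin, if_pos ⟨List.mem_cons_of_mem _ hin.1, hin.2⟩]
          · rw [if_neg hin, if_neg (by
              intro hc
              rcases hc with ⟨hm, hdd⟩
              rcases List.mem_cons.mp hm with rfl | hm'
              · exact hxy rfl
              · exact hin ⟨hm', hdd⟩)]
      · rw [List.filter_cons, if_neg (by exact hdead)]
        exact hs

lemma pvAddLoop_spec (p m k t : Int) :
    ∀ (fuel : Nat) (sv : PyServ) (idv : Int),
    (∀ x : Int, idv ≤ x → sv.tbl[x]? = none) →
    (PySem.Int.floordiv p m - sv.len).toNat = fuel →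
    ∃ sv' : PyServ, pvAddLoop p m k t fuel sv idv = (sv', idv + fuel)
      ∧ sv'.rorder = (PySem.List.pyRange idv (idv + fuel) 1).reverse ++ sv.rorder
      ∧ (∀ x : Int, sv'.tbl[x]? =
          if idv ≤ x ∧ x < idv + (fuel : Int) then some (pvTimeDict (t + k)) else sv.tbl[x]?)
      ∧ sv'.tbl.size = sv.tbl.size + fuel := by
  intro fuel
  induction fuel with
  | zero =>
    intro sv idv _ _
    refine ⟨sv, by simp [pvAddLoop], by simp [PySem.List.pyRange_one_eq_nil], fun x => ?_, by simp⟩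
    rw [if_neg (by push_cast; omega)]
  | succ fuel ih =>
    intro sv idv hfresh hf
    have hgt : PySem.Int.floordiv p m > sv.len := by
      unfold PyServ.len at hf ⊢; omega
    simp only [pvAddLoop, if_pos hgt]
    have hnone : sv.tbl[idv]? = none := hfresh idv (le_refl _)
    have hnc : sv.tbl.contains idv = false := by
      rw [Std.HashMap.contains_eq_isSome_getElem?, hnone]; rfl
    have hnm : ¬ idv ∈ sv.tbl := by
      rw [Std.HashMap.mem_iff_contains, hnc]; simp
    have hins : sv.insert idv (pvTimeDict (t + k))
        = ⟨idv :: sv.rorder, sv.tbl.insert idv (pvTimeDict (t + k))⟩ := by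
      unfold PyServ.insert
      rw [hnc]
      simp
    set sv₀ : PyServ := ⟨idv :: sv.rorder, sv.tbl.insert idv (pvTimeDict (t + k))⟩ with hsv₀
    have hget₀ : ∀ x : Int, sv₀.tbl[x]?
        = if idv = x then some (pvTimeDict (t + k)) else sv.tbl[x]? := by
      intro x
      simp [hsv₀, Std.HashMap.getElem?_insert]
    have hsz₀ : sv₀.tbl.size = sv.tbl.size + 1 := by
      simp [hsv₀, Std.HashMap.size_insert, hnm]
    have hfresh₀ : ∀ x : Int, idv + 1 ≤ x → sv₀.tbl[x]? = none := by
      intro x hx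
      rw [hget₀, if_neg (by omega)]
      exact hfresh x (by omega)
    have hlen₀ : (PySem.Int.floordiv p m - sv₀.len).toNat = fuel := by
      unfold PyServ.len at hf ⊢
      rw [hsz₀]
      push_cast
      omega
    obtain ⟨sv', heq, ho, hg, hs⟩ := ih sv₀ (idv + 1) hfresh₀ hlen₀
    rw [hins]
    refine ⟨sv', by rw [heq]; refine Prod.ext rfl ?_; push_cast; ring, ?_, ?_, ?_⟩
    · rw [ho]
      rw [show (idv + ((fuel + 1 : Nat) : Int)) = (idv + 1) + (fuel : Int) from by push_cast; ring]
      rw [PySem.List.pyRange_one_cons (a := idv) (b := (idv + 1) + (fuel : Int)) (by omega)]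
      simp [hsv₀]
    · intro x
      rw [hg x, hget₀ x]
      by_cases h1 : idv + 1 ≤ x ∧ x < idv + 1 + (fuel : Int)
      · rw [if_pos h1, if_pos (by push_cast; omega)]
      · rw [if_neg h1]
        by_cases h2 : idv = x
        · rw [if_pos h2, if_pos (by push_cast; omega)]
        · rw [if_neg h2, if_neg (by push_cast; omega)]
    · rw [hs, hsz₀]
      omega

lemma pvLenSplit {α : Type} (p : α → Bool) :
    ∀ l : List α, (l.filter p).length + (l.filter (fun a => !p a)).length = l.length := by
  intro l
  induction l with
  | nil => simp
  | cons a l ih => by_cases h : p a <;> simp [h] <;> omega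

def pvRep (k : Int) (L : List (Int × Int × Nat)) (idv : Int) (sv : PyServ) : Prop :=
  0 ≤ idv
  ∧ sv.rorder.reverse = PySem.List.pyRange 0 idv 1
  ∧ (∀ x : Int, sv.tbl[x]? = (PySem.Dict.mk (pvFlat k L)).get? x)
  ∧ sv.tbl.size = (pvFlat k L).length

def pvInv (k lf t : Int) (L : List (Int × Int × Nat))
    (sv : PyServ) (idv : Int)
    (ex : PySem.Dict Int Int) (active total : Int) : Prop :=
  pvRep k L idv sv
  ∧ (∀ b ∈ L, b.1 < t ∧ t ≤ b.1 + lf ∧ 1 ≤ b.2.2 ∧ 0 ≤ b.2.1 ∧ b.2.1 + (b.2.2 : Int) ≤ idv)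
  ∧ L.Pairwise (fun x y => x.2.1 + (x.2.2 : Int) ≤ y.2.1)
  ∧ active = (L.map (fun b => ((b.2.2 : Nat) : Int))).sum
  ∧ total = idv
  ∧ ∀ u : Int, t ≤ u →
      ex.getD u 0 = ((L.filter (fun b => b.1 + lf == u)).map (fun b => ((b.2.2 : Nat) : Int))).sum

-- keys of pvFlat are in [0, idv)

lemma pvFlatKeyBounds (k : Int) (L : List (Int × Int × Nat)) (idv : Int)
    (hb : ∀ b ∈ L, 0 ≤ b.2.1 ∧ b.2.1 + (b.2.2 : Int) ≤ idv) :
    ∀ x ∈ (pvFlat k L).map Prod.fst, 0 ≤ x ∧ x < idv := by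
  intro x hx
  rw [List.mem_map] at hx
  obtain ⟨pr, hpr, hfst⟩ := hx
  obtain ⟨y, hy, h1, h2, _⟩ := pvFlat_mem_key k L pr hpr
  have := hb y hy
  omega

lemma pvMkFlatNone (k : Int) (L : List (Int × Int × Nat)) (idv : Int)
    (hb : ∀ b ∈ L, 0 ≤ b.2.1 ∧ b.2.1 + (b.2.2 : Int) ≤ idv) :
    ∀ x : Int, idv ≤ x → (PySem.Dict.mk (pvFlat k L)).get? x = none := by
  intro x hx
  rw [PySem.Dict.get?_eq_none_iff_not_mem_keys]
  intro hmem
  have : x ∈ (pvFlat k L).map Prod.fst := by simpa [PySem.Dict.keys] using hmem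
  have := pvFlatKeyBounds k L idv hb x this
  omega

lemma pvDelPhase (k lf t idv : Int) (hlf : lf = if k > 1 then k else 1)
    (L : List (Int × Int × Nat)) (sv : PyServ)
    (hrep : pvRep k L idv sv)
    (hb : ∀ b ∈ L, b.1 < t ∧ t ≤ b.1 + lf ∧ 1 ≤ b.2.2 ∧ 0 ≤ b.2.1 ∧ b.2.1 + (b.2.2 : Int) ≤ idv)
    (hpw : L.Pairwise (fun x y => x.2.1 + (x.2.2 : Int) ≤ y.2.1)) :
    pvRep k (L.filter (fun b => decide (t + 1 ≤ b.1 + lf))) idv (sv.keys.foldl (pvDelStep t) sv) := by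
  obtain ⟨hid, hord, hget, hsz⟩ := hrep
  have hsorted := pvFlat_keys_sorted k L hpw
  have hnodup := pvFlat_keys_nodup k L hpw
  have hkeys : sv.keys = (pvFlat k L).map Prod.fst := by
    unfold PyServ.keys
    rw [hord]
    have hc : ∀ x : Int, sv.tbl.contains x = decide (x ∈ (pvFlat k L).map Prod.fst) := by
      intro x
      rw [Std.HashMap.contains_eq_isSome_getElem?, hget x]
      by_cases hm : x ∈ (pvFlat k L).map Prod.fst
      · have : (PySem.Dict.mk (pvFlat k L)).get? x ≠ none := by
          rw [Ne, PySem.Dict.get?_eq_none_iff_not_mem_keys]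
          simpa [PySem.Dict.keys] using hm
        cases hgx : (PySem.Dict.mk (pvFlat k L)).get? x with
        | none => exact absurd hgx this
        | some v => simp [hm]
      · have : (PySem.Dict.mk (pvFlat k L)).get? x = none := by
          rw [PySem.Dict.get?_eq_none_iff_not_mem_keys]
          simpa [PySem.Dict.keys] using hm
        rw [this]
        simp [hm]
    rw [List.filter_congr (fun x _ => hc x)]
    exact pvFilterRangeMem _ 0 idv hsorted
      (pvFlatKeyBounds k L idv (fun b hbm => ⟨(hb b hbm).2.2.2.1, (hb b hbm).2.2.2.2⟩))
  rw [hkeys]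
  obtain ⟨ho, hg, hs⟩ := pvDelFold t ((pvFlat k L).map Prod.fst) sv hnodup
  have hflt : pvFlat k (L.filter (fun b => decide (t + 1 ≤ b.1 + lf)))
      = (pvFlat k L).filter (fun pr => !pvDead t pr.2) :=
    (pvFlat_filter k lf t hlf L (fun b hbm => (hb b hbm).1)).symm
  refine ⟨hid, by rw [ho, hord], ?_, ?_⟩
  · intro x
    rw [hg x, hget x, hflt, pvGetMkFilter t (pvFlat k L) hnodup x]
    cases hmk : (PySem.Dict.mk (pvFlat k L)).get? x with
    | none => simp [pvDeadO]
    | some v =>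
      have hxm : x ∈ (pvFlat k L).map Prod.fst := by
        by_contra hnm
        have hn : (PySem.Dict.mk (pvFlat k L)).get? x = none := by
          rw [PySem.Dict.get?_eq_none_iff_not_mem_keys]
          simpa [PySem.Dict.keys] using hnm
        rw [hmk] at hn
        simp at hn
      by_cases hd : pvDead t v
      · rw [if_pos ⟨hxm, by simp [pvDeadO, hd]⟩]
        simp [hd]
      · rw [if_neg (by
          intro hc
          exact hd (by simpa [pvDeadO] using hc.2))]
        simp [hd]
  · rw [hflt]
    have hcongr : ((pvFlat k L).map Prod.fst).filter (fun x => pvDeadO t sv.tbl[x]?)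
        = ((pvFlat k L).map Prod.fst).filter
            (fun x => pvDeadO t ((PySem.Dict.mk (pvFlat k L)).get? x)) :=
      List.filter_congr (fun x _ => by rw [hget x])
    rw [hcongr, pvCountDead t (pvFlat k L) hnodup, hsz] at hs
    have hls := pvLenSplit (fun pr : Int × PySem.Dict String Int => pvDead t pr.2) (pvFlat k L)
    omega

lemma pvStep_inv (m k lf : Int) (hlf : lf = if k > 1 then k else 1)
    (t : Int) (L : List (Int × Int × Nat))
    (sv : PyServ) (idv : Int)
    (ex : PySem.Dict Int Int) (active total : Int)
    (h : pvInv k lf t L sv idv ex active total) (p : Int) :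
    ∃ L', pvInv k lf (t + 1) L'
      (pvStepA m k (sv, idv, t) p).1 (pvStepA m k (sv, idv, t) p).2.1
      (pvStepB m lf (ex, active, total) (t, p)).1
      (pvStepB m lf (ex, active, total) (t, p)).2.1
      (pvStepB m lf (ex, active, total) (t, p)).2.2 := by
  obtain ⟨hrep, hb, hpw, hac, htot, hex⟩ := h
  have hlf1 : 1 ≤ lf := by by_cases hk1 : k > 1 <;> simp [hk1] at hlf <;> omega
  subst hac
  set need := PySem.Int.floordiv p m with hneed
  set L' := L.filter (fun b => decide (t + 1 ≤ b.1 + lf)) with hL'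
  have hrep₁ := pvDelPhase k lf t idv hlf L sv hrep hb hpw
  rw [← hL'] at hrep₁
  obtain ⟨hid, hord₁, hget₁, hsz₁⟩ := hrep₁
  set sv₁ := sv.keys.foldl (pvDelStep t) sv with hsv₁
  -- sizes and sums
  have hsize : (sv₁.tbl.size : Int) = (L'.map (fun b => ((b.2.2 : Nat) : Int))).sum := by
    rw [hsz₁, pvFlat_length]
    exact pvSumCast L'
  set S' : Int := (L'.map (fun b => ((b.2.2 : Nat) : Int))).sum with hS'
  -- B's removal of expired servers
  have hdeadfilter : L.filter (fun x => !(decide (t + 1 ≤ x.1 + lf))) =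
      L.filter (fun b => b.1 + lf == t) := by
    apply List.filter_congr
    intro b hbm
    have h2 := (hb b hbm).2.1
    by_cases he : b.1 + lf = t
    · simp [he]
    · have h3 : t + 1 ≤ b.1 + lf := by omega
      simp [he, h3]
  have hactive1 : (L.map (fun b => ((b.2.2 : Nat) : Int))).sum - ex.getD t 0 = S' := by
    rw [hex t (le_refl t)]
    have hsp := pvSumSplit (fun b : Int × Int × Nat => decide (t + 1 ≤ b.1 + lf))
      (fun b => ((b.2.2 : Nat) : Int)) L
    rw [hdeadfilter] at hsp
    rw [← hL'] at hsp
    omega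
  have hbL' : ∀ b ∈ L', b.1 < t ∧ t + 1 ≤ b.1 + lf ∧ 1 ≤ b.2.2 ∧ 0 ≤ b.2.1 ∧ b.2.1 + (b.2.2 : Int) ≤ idv := by
    intro b hbm
    have h1 := hb b (List.mem_of_mem_filter hbm)
    have h2 := List.of_mem_filter hbm
    simp at h2
    exact ⟨h1.1, h2, h1.2.2.1, h1.2.2.2.1, h1.2.2.2.2⟩
  have hpwL' : L'.Pairwise (fun x y => x.2.1 + (x.2.2 : Int) ≤ y.2.1) :=
    hpw.sublist (List.filter_sublist)
  have hfresh : ∀ x : Int, idv ≤ x → sv₁.tbl[x]? = none := by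
    intro x hx
    rw [hget₁ x]
    exact pvMkFlatNone k L' idv (fun b hbm => ⟨(hbL' b hbm).2.2.2.1, (hbL' b hbm).2.2.2.2⟩) x hx
  simp only [pvStepA, pvStepB, ← hsv₁]
  by_cases hgt : need > S'
  · -- servers are added
    set f : Nat := (need - S').toNat with hf
    have hfInt : (f : Int) = need - S' := by omega
    obtain ⟨sv₂, heq, ho₂, hg₂, hs₂⟩ := pvAddLoop_spec p m k t f sv₁ idv hfresh
      (by unfold PyServ.len; rw [hsize])
    rw [show (PySem.Int.floordiv p m - sv₁.len).toNat = f from by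
      unfold PyServ.len; rw [hsize]]
    rw [heq]
    rw [if_pos (by rw [hactive1]; exact hgt)]
    dsimp only
    refine ⟨L' ++ [(t, idv, f)], ⟨by omega, ?_, ?_, ?_⟩, ?_, ?_, ?_, by omega, ?_⟩
    · -- rorder
      rw [ho₂, List.reverse_append, List.reverse_reverse, hord₁,
          ← PySem.List.pyRange_one_append 0 idv (idv + (f : Int)) (by omega) (by omega)]
    · -- lookups
      intro x
      rw [hg₂ x, hget₁ x, pvFlat_append, pvFlat_cons, pvFlat_nil, List.append_nil,
          pvGetMkAppend, pvGetMkEntries]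
      by_cases h1 : idv ≤ x ∧ x < idv + (f : Int)
      · rw [if_pos h1, if_pos h1]
        have : (PySem.Dict.mk (pvFlat k L')).get? x = none :=
          pvMkFlatNone k L' idv (fun b hbm => ⟨(hbL' b hbm).2.2.2.1, (hbL' b hbm).2.2.2.2⟩) x h1.1
        rw [this, Option.none_or]
      · rw [if_neg h1, if_neg h1, Option.or_none]
    · -- size
      rw [hs₂, hsz₁, pvFlat_append, pvFlat_cons, pvFlat_nil, List.append_nil,
          List.length_append, pvEntries_len]
    · -- batch bounds
      intro b hbm
      rcases List.mem_append.mp hbm with hm | hm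
      · have hbb := hbL' b hm
        refine ⟨by omega, by omega, hbb.2.2.1, hbb.2.2.2.1, by omega⟩
      · simp at hm
        subst hm
        refine ⟨show t < t + 1 by omega, show t + 1 ≤ t + lf by omega,
          show 1 ≤ f by omega, show (0:Int) ≤ idv by omega,
          show idv + (f : Int) ≤ idv + (f : Int) from le_refl _⟩
    · -- pairwise
      rw [List.pairwise_append]
      refine ⟨hpwL', List.pairwise_singleton _ _, ?_⟩
      intro x hx y hy
      simp at hy
      subst hy
      show x.2.1 + (x.2.2 : Int) ≤ idv
      exact (hbL' x hx).2.2.2.2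
    · -- active
      rw [List.map_append, List.sum_append]
      simp only [List.map_cons, List.map_nil, List.sum_cons, List.sum_nil, add_zero]
      rw [← hS']
      omega
    · -- expire
      intro u hu
      rw [PySem.Dict.getD_insert, List.filter_append, List.map_append, List.sum_append]
      by_cases he : u = t + lf
      · rw [if_pos he]
        have hnil : L'.filter (fun b => b.1 + lf == u) = [] := by
          apply List.filter_eq_nil_iff.mpr
          intro b hbm
          have hblt := (hbL' b hbm).1
          simp
          omega
        rw [hnil]
        have hnew : (((t, idv, f) : Int × Int × Nat).1 + lf == u) = true := by simp [he]
        simp only [List.filter_cons, hnew, if_pos, List.filter_nil,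
          List.map_cons, List.map_nil, List.sum_cons, List.sum_nil]
        rw [hactive1]
        simp
        omega
      · rw [if_neg he]
        have hnew : (((t, idv, f) : Int × Int × Nat).1 + lf == u) = false := by simp; omega
        simp only [List.filter_cons, hnew, Bool.false_eq_true, if_false, List.filter_nil,
          List.map_nil, List.sum_nil, add_zero]
        rw [hex u (by omega), hL', pvFilterU lf t u hu L (fun b hbm => (hb b hbm).2.1)]
  · -- no servers added
    have hzero : pvAddLoop p m k t ((PySem.Int.floordiv p m - sv₁.len).toNat) sv₁ idv
        = (sv₁, idv) := by
      rw [show ((PySem.Int.floordiv p m - sv₁.len).toNat) = 0 from by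
        unfold PyServ.len; rw [hsize]; omega]
      rfl
    rw [hzero]
    rw [if_neg (by rw [hactive1]; exact hgt)]
    dsimp only
    refine ⟨L', ⟨hid, hord₁, hget₁, hsz₁⟩, ?_, hpwL', hactive1, htot, ?_⟩
    · intro b hbm
      have hbb := hbL' b hbm
      exact ⟨by omega, by omega, hbb.2.2.1, hbb.2.2.2.1, hbb.2.2.2.2⟩
    · intro u hu
      rw [hex u (by omega), hL', pvFilterU lf t u hu L (fun b hbm => (hb b hbm).2.1)]

lemma pvMain (m k lf : Int) (hlf : lf = if k > 1 then k else 1) :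
    ∀ (rest : List Int) (t : Int) (L : List (Int × Int × Nat))
      (sv : PyServ) (idv : Int)
      (ex : PySem.Dict Int Int) (active total : Int),
    pvInv k lf t L sv idv ex active total →
    (rest.foldl (pvStepA m k) (sv, idv, t)).2.1
      = ((PySem.List.enumerate rest t).foldl (pvStepB m lf) (ex, active, total)).2.2 := by
  intro rest
  induction rest with
  | nil =>
    intro t L sv idv ex active total h
    exact h.2.2.2.2.1.symm
  | cons p rest ih =>
    intro t L sv idv ex active total h
    obtain ⟨L', h'⟩ := pvStep_inv m k lf hlf t L sv idv ex active total h p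
    rw [PySem.List.enumerate_cons, List.foldl_cons, List.foldl_cons]
    have hA : pvStepA m k (sv, idv, t) p
        = ((pvStepA m k (sv, idv, t) p).1, (pvStepA m k (sv, idv, t) p).2.1, t + 1) := rfl
    have hB : pvStepB m lf (ex, active, total) (t, p)
        = ((pvStepB m lf (ex, active, total) (t, p)).1,
           (pvStepB m lf (ex, active, total) (t, p)).2.1,
           (pvStepB m lf (ex, active, total) (t, p)).2.2) := rfl
    rw [hA, hB]
    exact ih (t + 1) L' _ _ _ _ _ h'

theorem pvFinal (players : List Int) (m : Int) (k : Int) :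
    solution players m k = solution_alt players m k := by
  unfold solution solution_alt
  apply pvMain m k _ rfl players 0 [] _ _ _ _ _
  refine ⟨⟨le_refl 0, ?_, ?_, ?_⟩, by simp, List.Pairwise.nil, by simp, rfl, ?_⟩
  · simp [PyServ.empty, PySem.List.pyRange_one_eq_nil]
  · intro x
    simp [PyServ.empty, pvFlat, PySem.Dict.get?]
  · simp [PyServ.empty, pvFlat]
  · intro u _
    simp [PySem.Dict.getD_empty]

-- ===== VERDICT (by name: the statement is the Claim_ definition above) =====
theorem solution_spec : Claim_equal_solution := by
  intro players m k _ _
  unfold Spec_solution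
  exact pvFinal players m k
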